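-- pv_equiv track=rewrite | github.com/Pivot-Wealth-Digital/adviser_allocation | src/adviser_allocation/api/box_routes.py | _choose_collaborator_entry
-- ===== SOURCE A (Python) =====
-- from typing import Dict, List, Optional, Tuple
--
-- def _choose_collaborator_entry(order: List[str], collaborators: Dict[str, dict]) -> Optional[dict]:
--     if not order:
--         return None
--     for email in order:
--         entry = collaborators.get(email)
--         if entry and entry.get("is_external"):
--             return entry
--     # Fallback to first entry
--     for email in order:
--         entry = collaborators.get(email)
--         if entry:
--             return entry
--     return None
-- ===== SOURCE B (Python) =====
-- from typing import Dict, List, Optional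
--
-- def _choose_collaborator_entry(order: List[str], collaborators: Dict[str, dict]) -> Optional[dict]:
--     fallback = None
--     for email in order:
--         entry = collaborators.get(email)
--         if entry:
--             if entry.get("is_external"):
--                 return entry
--             if fallback is None:
--                 fallback = entry
--     return fallback
-- ===== Notes on version B (the rewrite author's own statement) =====
-- stated objective: simpler
-- what changed: Replaces A's two sequential passes over order (external scan, then fallback scan) with a single pass that remembers the first truthy entry in a fallback variable and returns early on an external one; the empty-order guard disappears because the loop returns None naturally.
import Mathlib
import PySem

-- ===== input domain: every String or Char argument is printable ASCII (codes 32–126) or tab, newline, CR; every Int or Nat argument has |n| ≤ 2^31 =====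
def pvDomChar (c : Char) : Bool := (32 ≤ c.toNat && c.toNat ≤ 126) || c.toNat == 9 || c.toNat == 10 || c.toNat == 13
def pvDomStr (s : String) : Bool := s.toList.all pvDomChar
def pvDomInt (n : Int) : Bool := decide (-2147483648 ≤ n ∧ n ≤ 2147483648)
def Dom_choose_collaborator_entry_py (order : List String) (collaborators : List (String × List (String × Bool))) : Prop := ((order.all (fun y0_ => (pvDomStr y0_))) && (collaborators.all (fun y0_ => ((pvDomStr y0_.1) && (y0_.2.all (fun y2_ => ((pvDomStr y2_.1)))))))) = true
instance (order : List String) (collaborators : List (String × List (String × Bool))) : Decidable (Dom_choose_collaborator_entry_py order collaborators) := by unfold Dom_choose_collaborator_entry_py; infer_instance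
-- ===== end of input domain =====

-- B replaces A's two sequential passes with one pass keeping a fallback variable (objective: simpler).

-- ===== PORT A =====
-- first loop of A: return the first truthy entry whose "is_external" is truthy
def pvAExtLoop (collaborators : List (String × List (String × Bool))) : List String → Option (List (String × Bool))
  | [] => none
  | email :: rest =>
    match (PySem.Dict.mk collaborators).get? email with
    | some entry =>
      if !entry.isEmpty && PySem.Dict.getD (PySem.Dict.mk entry) "is_external" false then some entry
      else pvAExtLoop collaborators rest
    | none => pvAExtLoop collaborators rest

-- second loop of A: return the first truthy entry
def pvAFallLoop (collaborators : List (String × List (String × Bool))) : List String → Option (List (String × Bool))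
  | [] => none
  | email :: rest =>
    match (PySem.Dict.mk collaborators).get? email with
    | some entry =>
      if !entry.isEmpty then some entry else pvAFallLoop collaborators rest
    | none => pvAFallLoop collaborators rest

def choose_collaborator_entry_py (order : List String) (collaborators : List (String × List (String × Bool))) : Option (List (String × Bool)) :=
  if order.isEmpty then none
  else
    match pvAExtLoop collaborators order with
    | some entry => some entry
    | none => pvAFallLoop collaborators order

-- ===== PORT B =====
-- single loop maintaining a fallback (None at first truthy entry ⇒ record it)
def pvBLoop (collaborators : List (String × List (String × Bool))) : List String → Option (List (String × Bool)) → Option (List (String × Bool))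
  | [], fallback => fallback
  | email :: rest, fallback =>
    match (PySem.Dict.mk collaborators).get? email with
    | some entry =>
      if !entry.isEmpty then
        if PySem.Dict.getD (PySem.Dict.mk entry) "is_external" false then some entry
        else pvBLoop collaborators rest (if fallback.isNone then some entry else fallback)
      else pvBLoop collaborators rest fallback
    | none => pvBLoop collaborators rest fallback

def choose_collaborator_entry_py_alt (order : List String) (collaborators : List (String × List (String × Bool))) : Option (List (String × Bool)) :=
  pvBLoop collaborators order none

-- ===== PRECONDITION & SPEC =====
def Spec_choose_collaborator_entry_py (order : List String) (collaborators : List (String × List (String × Bool))) (out : Option (List (String × Bool))) : Prop := out = choose_collaborator_entry_py_alt order collaborators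
instance (order : List String) (collaborators : List (String × List (String × Bool))) (out : Option (List (String × Bool))) : Decidable (Spec_choose_collaborator_entry_py order collaborators out) := by unfold Spec_choose_collaborator_entry_py; infer_instance

-- ===== CLAIM (what is proved, stated in full; the proofs are below) =====
def Claim_equal_choose_collaborator_entry_py : Prop := ∀ (order : List String) (collaborators : List (String × List (String × Bool))), Dom_choose_collaborator_entry_py order collaborators → Spec_choose_collaborator_entry_py order collaborators (choose_collaborator_entry_py order collaborators)

-- ===== LEMMAS AND PROOFS =====
-- loop invariant: B's single loop equals A's external pass, falling back to the
-- accumulated fallback and then to A's fallback pass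
theorem pvBLoop_eq (collaborators : List (String × List (String × Bool))) :
    ∀ (order : List String) (fb : Option (List (String × Bool))),
      pvBLoop collaborators order fb =
        match pvAExtLoop collaborators order with
        | some e => some e
        | none => match fb with
                  | some f => some f
                  | none => pvAFallLoop collaborators order := by
  intro order
  induction order with
  | nil => intro fb; cases fb <;> simp [pvBLoop, pvAExtLoop, pvAFallLoop]
  | cons email rest ih =>
    intro fb
    simp only [pvBLoop, pvAExtLoop, pvAFallLoop]
    cases h : (PySem.Dict.mk collaborators).get? email with
    | none => exact ih fb
    | some entry =>
      by_cases he : entry.isEmpty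
      · simp [he, ih fb]
      · by_cases hx : PySem.Dict.getD (PySem.Dict.mk entry) "is_external" false
        · simp [he, hx]
        · simp only [he, hx, Bool.not_false,
            Bool.and_false, if_true]
          rw [ih]
          cases fb <;> simp

-- ===== VERDICT (by name: the statement is the Claim_ definition above) =====
theorem choose_collaborator_entry_py_spec : Claim_equal_choose_collaborator_entry_py := by
  intro order collaborators _
  unfold Spec_choose_collaborator_entry_py choose_collaborator_entry_py choose_collaborator_entry_py_alt
  rw [pvBLoop_eq]
  cases order with
  | nil => simp [pvAExtLoop, pvAFallLoop]
  | cons a rest => simp
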